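-- pv_equiv track=rewrite | github.com/Shiv2157k/LeetCode2024 | microsoft_may_redo/array/FindClosestNumberToZero.py | find
-- ===== SOURCE A (Python) =====
-- from typing import List
--
-- def find(nums: List[int]) -> int:
--     """
--     Approach: Absolute diff
--     T: O(N)
--     S: O(1)
--     :param nums:
--     :return:
--     """
--
--     closest = nums[0]
--     diff = abs(nums[0])
--
--     for i in range(1, len(nums)):
--
--         if abs(nums[i]) < diff:
--             diff = abs(nums[i])
--             closest = nums[i]
--
--         if diff == abs(nums[i]) and nums[i] > closest:
--             closest = nums[i]
--     return closest
-- ===== SOURCE B (Python) =====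
-- from typing import List
--
-- def find(nums: List[int]) -> int:
--     # Sort by (abs value asc, value desc so the larger wins ties) and take the first.
--     return sorted(nums, key=lambda x: (abs(x), -x))[0]
-- ===== Notes on version B (the rewrite author's own statement) =====
-- stated objective: simpler
-- what changed: Replaced the running-minimum scan with explicit tie handling by a one-line sort on the composite key (abs(x), -x) followed by indexing the first element.
import Mathlib
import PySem

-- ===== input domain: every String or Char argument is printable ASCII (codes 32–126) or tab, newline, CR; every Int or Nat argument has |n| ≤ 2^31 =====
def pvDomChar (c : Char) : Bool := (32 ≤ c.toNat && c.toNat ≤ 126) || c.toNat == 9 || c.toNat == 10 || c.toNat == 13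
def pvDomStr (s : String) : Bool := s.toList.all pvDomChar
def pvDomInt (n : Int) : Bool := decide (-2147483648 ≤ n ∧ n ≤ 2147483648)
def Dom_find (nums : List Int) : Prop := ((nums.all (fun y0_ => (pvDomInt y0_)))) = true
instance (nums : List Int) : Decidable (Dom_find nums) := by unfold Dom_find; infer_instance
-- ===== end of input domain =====

-- B replaces A's running-minimum scan by a sort on the key (abs x, -x) plus taking the first
-- element: simpler, not faster. Both raise IndexError on the empty list (excluded by Pre_find).

-- ===== PORT A =====
-- body of A's loop: the two ifs, state = (closest, diff)
def findStep (s : Int × Int) (x : Int) : Int × Int :=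
  let s1 := if |x| < s.2 then (x, |x|) else s
  if s1.2 = |x| ∧ x > s1.1 then (x, s1.2) else s1

def find (nums : List Int) : Int :=
  match nums with
  | [] => 0  -- nums[0] raises IndexError on []; excluded by Pre_find
  | n0 :: _ =>
    -- for i in range(1, len(nums)), reading nums[i]
    (List.foldl
      (fun (s : Int × Int) i => findStep s (PySem.List.pyGetD nums i 0))
      (n0, |n0|)
      (PySem.List.pyRange 1 (PySem.List.len nums))).1

-- ===== PORT B =====
def find_alt (nums : List Int) : Int :=
  match PySem.List.sorted2 nums (fun x => |x|) (fun x => -x) with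
  | [] => 0  -- sorted(nums, ...)[0] raises IndexError on []; excluded by Pre_find
  | h :: _ => h

-- ===== PRECONDITION & SPEC =====
-- Pre_find excludes only the empty list, on which A raises IndexError (nums[0]).
def Pre_find (nums : List Int) : Prop := nums ≠ []
instance (nums : List Int) : Decidable (Pre_find nums) := by unfold Pre_find; infer_instance
def pvWitness_find : List Int := [1, -1]

def Spec_find (nums : List Int) (out : Int) : Prop := out = find_alt nums
instance (nums : List Int) (out : Int) : Decidable (Spec_find nums out) := by unfold Spec_find; infer_instance

-- ===== CLAIM (what is proved, stated in full; the proofs are below) =====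
def Claim_equal_find : Prop := ∀ (nums : List Int), Dom_find nums → Pre_find nums → Spec_find nums (find nums)

-- ===== LEMMAS AND PROOFS =====

-- the comparator sorted2 uses for key (|x|, -x): "x strictly precedes c"
def pvB (a c : Int) : Bool :=
  decide (|a| < |c|) || (!decide (|c| < |a|) && decide (-a < -c))

-- running "keep the better of c and n" under pvB
def pvG (c n : Int) : Int := if pvB n c then n else c

theorem pvHead_foldl_insertBy (xs : List Int) (h : Int) (t : List Int) :
    (xs.foldl (fun acc x => PySem.List.insertBy pvB x acc) (h :: t)).head? =
      some (xs.foldl pvG h) := by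
  induction xs generalizing h t with
  | nil => rfl
  | cons x xs ih =>
    simp only [List.foldl]
    by_cases hb : pvB x h
    · rw [show PySem.List.insertBy pvB x (h :: t) = x :: h :: t from by
        simp [PySem.List.insertBy, hb]]
      rw [ih]
      simp [pvG, hb]
    · rw [show PySem.List.insertBy pvB x (h :: t) = h :: PySem.List.insertBy pvB x t from by
        simp [PySem.List.insertBy, hb]]
      rw [ih]
      simp [pvG, hb]

theorem pvSorted2_eq (nums : List Int) :
    PySem.List.sorted2 nums (fun x => |x|) (fun x => -x) =
      nums.foldl (fun acc x => PySem.List.insertBy pvB x acc) [] := rfl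

theorem pvStepA (c x : Int) :
    findStep (c, |c|) x = (pvG c x, |pvG c x|) := by
  unfold findStep pvG pvB
  split_ifs <;> simp_all
  omega

theorem pvFoldA (xs : List Int) (c : Int) :
    xs.foldl findStep (c, |c|) = (xs.foldl pvG c, |xs.foldl pvG c|) := by
  induction xs generalizing c with
  | nil => rfl
  | cons x xs ih =>
    simp only [List.foldl]
    rw [pvStepA]
    exact ih (pvG c x)

theorem pvFind_eq (n0 : Int) (rest : List Int) :
    find (n0 :: rest) = rest.foldl pvG n0 := by
  have hdef : find (n0 :: rest) =
      (List.foldl (fun s i => findStep s (PySem.List.pyGetD (n0 :: rest) i 0))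
        (n0, |n0|) (PySem.List.pyRange 1 (PySem.List.len (n0 :: rest)))).1 := rfl
  rw [hdef, PySem.List.foldl_pyRange_pyGetD (n0 :: rest) 0 findStep (n0, |n0|) (by norm_num)]
  simp only [Int.toNat_one, List.drop_one, List.tail_cons]
  rw [pvFoldA]

theorem pvFindAlt_eq (n0 : Int) (rest : List Int) :
    find_alt (n0 :: rest) = rest.foldl pvG n0 := by
  have hh : (PySem.List.sorted2 (n0 :: rest) (fun x => |x|) (fun x => -x)).head? =
      some (rest.foldl pvG n0) := by
    rw [pvSorted2_eq]
    simp only [List.foldl]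
    rw [show PySem.List.insertBy pvB n0 [] = [n0] from rfl]
    exact pvHead_foldl_insertBy rest n0 []
  unfold find_alt
  cases hs : PySem.List.sorted2 (n0 :: rest) (fun x => |x|) (fun x => -x) with
  | nil => rw [hs] at hh; simp at hh
  | cons h t => rw [hs] at hh; simp at hh; simp [hh]

-- ===== VERDICT (by name: the statement is the Claim_ definition above) =====
theorem find_spec : Claim_equal_find := by
  intro nums _ hpre
  cases nums with
  | nil => exact absurd rfl hpre
  | cons n0 rest =>
    show find (n0 :: rest) = find_alt (n0 :: rest)
    rw [pvFind_eq, pvFindAlt_eq]
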